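-- pv_equiv track=rewrite | github.com/shallgrimson/Coursera-Data-Structures-and-Algorithms-Specialization | Algorithmic Toolbox Course/Week 6/course_1_w6.py | Partitioning_recursion
-- ===== SOURCE A (Python) =====
-- def Partitioning_recursion(S, n, sum1, sum2, sum3):
--     if sum1 == 0 and sum2 == 0 and sum3 == 0:
--         return 1
--
--     #if no items left
--     if n >= len(S):
--         return 0
--
--     #first element in subset gets added to first set
--     s1, s2, s3 = False, False, False
--     if sum1 - S[n] >= 0:
--         s1 = Partitioning_recursion(S, n+1, sum1-S[n], sum2, sum3)
--
--     #first element in subset gets added to second set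
--     if sum2 - S[n] >= 0:
--         s2 = Partitioning_recursion(S, n+1, sum1, sum2-S[n], sum3)
--
--     #first element in subset gets added to third set
--     if sum3-S[n] >= 0:
--         s3 = Partitioning_recursion(S, n+1, sum1, sum2, sum3-S[n])
--
--     return int(s1 or s2 or s3)
-- ===== SOURCE B (Python) =====
-- def Partitioning_recursion(S, n, sum1, sum2, sum3):
--     # Iterative layered BFS over distinct (sum1, sum2, sum3) states; same
--     # return value as the recursion; duplicate states are merged.
--     states = {(sum1, sum2, sum3)}
--     i = n
--     while True:
--         if (0, 0, 0) in states:
--             return 1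
--         if i >= len(S):
--             return 0
--         x = S[i]
--         nxt = set()
--         for (a, b, c) in states:
--             if a - x >= 0:
--                 nxt.add((a - x, b, c))
--             if b - x >= 0:
--                 nxt.add((a, b - x, c))
--             if c - x >= 0:
--                 nxt.add((a, b, c - x))
--         states = nxt
--         i += 1
-- ===== Notes on version B (the rewrite author's own statement) =====
-- stated objective: alternative
-- what changed: Replaces the branching top-down recursion by an iterative forward BFS over layers of distinct (sum1,sum2,sum3) states kept in a set; duplicate states are merged, but on random large-int inputs states rarely coincide, so no speed is claimed.
import Mathlib
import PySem

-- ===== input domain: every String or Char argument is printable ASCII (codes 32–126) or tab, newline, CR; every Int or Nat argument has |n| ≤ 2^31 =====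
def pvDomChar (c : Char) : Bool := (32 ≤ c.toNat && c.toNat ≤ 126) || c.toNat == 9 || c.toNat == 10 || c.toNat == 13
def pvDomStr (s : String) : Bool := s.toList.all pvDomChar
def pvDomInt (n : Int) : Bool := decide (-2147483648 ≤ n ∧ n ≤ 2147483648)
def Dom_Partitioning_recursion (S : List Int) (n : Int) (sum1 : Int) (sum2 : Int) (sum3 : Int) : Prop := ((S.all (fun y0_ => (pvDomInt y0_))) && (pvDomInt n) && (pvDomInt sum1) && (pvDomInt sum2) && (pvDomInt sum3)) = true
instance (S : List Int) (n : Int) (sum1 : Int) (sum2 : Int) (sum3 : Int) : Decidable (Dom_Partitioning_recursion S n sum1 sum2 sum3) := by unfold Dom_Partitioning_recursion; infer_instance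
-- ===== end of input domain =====

-- B replaces A's branching top-down recursion by an iterative layered BFS over
-- the set of distinct (sum1,sum2,sum3) states (an alternative formulation).

-- ===== PORT A =====
-- int(s1 or s2 or s3) on 0/1/False operands: the first nonzero value, else 0
def pvOr3 (s1 s2 s3 : Int) : Int :=
  if s1 ≠ 0 then s1 else if s2 ≠ 0 then s2 else if s3 ≠ 0 then s3 else 0

def Partitioning_recursion (S : List Int) (n : Int) (sum1 : Int) (sum2 : Int) (sum3 : Int) : Int :=
  if sum1 = 0 ∧ sum2 = 0 ∧ sum3 = 0 then 1
  else if n ≥ (S.length : Int) then 0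
  else
    match PySem.List.pyGet? S n with
    | none => 0   -- S[n] raises IndexError in Python here; excluded by Pre_
    | some x =>
      pvOr3
        (if sum1 - x ≥ 0 then Partitioning_recursion S (n+1) (sum1 - x) sum2 sum3 else 0)
        (if sum2 - x ≥ 0 then Partitioning_recursion S (n+1) sum1 (sum2 - x) sum3 else 0)
        (if sum3 - x ≥ 0 then Partitioning_recursion S (n+1) sum1 sum2 (sum3 - x) else 0)
termination_by ((S.length : Int) - n).toNat
decreasing_by all_goals omega

-- ===== PORT B =====
-- one BFS layer: the set of successors of the states in T ('nxt' in Source B)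
def pvStep (x : Int) (T : List (Int × Int × Int)) : List (Int × Int × Int) :=
  T.foldl (fun acc s =>
    let acc1 := if s.1 - x ≥ 0 then PySem.Set.add acc (s.1 - x, s.2.1, s.2.2) else acc
    let acc2 := if s.2.1 - x ≥ 0 then PySem.Set.add acc1 (s.1, s.2.1 - x, s.2.2) else acc1
    if s.2.2 - x ≥ 0 then PySem.Set.add acc2 (s.1, s.2.1, s.2.2 - x) else acc2) PySem.Set.empty

-- the while-loop of Source B ('states' = T, loop counter i)
def pvRun (S : List Int) (i : Int) (T : List (Int × Int × Int)) : Int :=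
  if ((0 : Int), (0 : Int), (0 : Int)) ∈ T then 1
  else if i ≥ (S.length : Int) then 0
  else
    match PySem.List.pyGet? S i with
    | none => 0   -- S[i] raises IndexError in Python here; excluded by Pre_
    | some x => pvRun S (i+1) (pvStep x T)
termination_by ((S.length : Int) - i).toNat
decreasing_by all_goals omega

def Partitioning_recursion_alt (S : List Int) (n : Int) (sum1 : Int) (sum2 : Int) (sum3 : Int) : Int :=
  pvRun S n [(sum1, sum2, sum3)]

-- ===== PRECONDITION & SPEC =====
-- Pre_ excludes exactly the inputs on which both Pythons raise IndexError:
-- n < -len(S) with the three target sums not all zero.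
def Pre_Partitioning_recursion (S : List Int) (n : Int) (sum1 : Int) (sum2 : Int) (sum3 : Int) : Prop :=
  (sum1 = 0 ∧ sum2 = 0 ∧ sum3 = 0) ∨ -(S.length : Int) ≤ n
instance (S : List Int) (n : Int) (sum1 : Int) (sum2 : Int) (sum3 : Int) : Decidable (Pre_Partitioning_recursion S n sum1 sum2 sum3) := by unfold Pre_Partitioning_recursion; infer_instance

def pvWitness_Partitioning_recursion : List Int × Int × Int × Int × Int := ([3, 1, 1, 2, 2], 0, 3, 3, 3)

def Spec_Partitioning_recursion (S : List Int) (n : Int) (sum1 : Int) (sum2 : Int) (sum3 : Int) (out : Int) : Prop := out = Partitioning_recursion_alt S n sum1 sum2 sum3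
instance (S : List Int) (n : Int) (sum1 : Int) (sum2 : Int) (sum3 : Int) (out : Int) : Decidable (Spec_Partitioning_recursion S n sum1 sum2 sum3 out) := by unfold Spec_Partitioning_recursion; infer_instance

-- ===== CLAIM (what is proved, stated in full; the proofs are below) =====
def Claim_equal_Partitioning_recursion : Prop := ∀ (S : List Int) (n : Int) (sum1 : Int) (sum2 : Int) (sum3 : Int), Dom_Partitioning_recursion S n sum1 sum2 sum3 → Pre_Partitioning_recursion S n sum1 sum2 sum3 → Spec_Partitioning_recursion S n sum1 sum2 sum3 (Partitioning_recursion S n sum1 sum2 sum3)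

-- ===== LEMMAS AND PROOFS =====

-- A returns only 0 or 1
lemma PA_zero_or_one (S : List Int) (n a b c : Int) :
    Partitioning_recursion S n a b c = 0 ∨ Partitioning_recursion S n a b c = 1 := by
  fun_induction Partitioning_recursion S n a b c <;>
    simp_all [pvOr3] <;> split_ifs <;> simp_all

-- one-step characterisation of A at a non-terminal state
lemma PA_one_iff (S : List Int) (n a b c x : Int)
    (hx : PySem.List.pyGet? S n = some x) (hn : ¬ n ≥ (S.length : Int))
    (hz : ¬ (a = 0 ∧ b = 0 ∧ c = 0)) :
    Partitioning_recursion S n a b c = 1 ↔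
      ((a - x ≥ 0 ∧ Partitioning_recursion S (n+1) (a-x) b c = 1) ∨
       (b - x ≥ 0 ∧ Partitioning_recursion S (n+1) a (b-x) c = 1) ∨
       (c - x ≥ 0 ∧ Partitioning_recursion S (n+1) a b (c-x) = 1)) := by
  rw [Partitioning_recursion, if_neg hz, if_neg hn, hx]
  rcases PA_zero_or_one S (n+1) (a-x) b c with h1 | h1 <;>
  rcases PA_zero_or_one S (n+1) a (b-x) c with h2 | h2 <;>
  rcases PA_zero_or_one S (n+1) a b (c-x) with h3 | h3 <;>
    simp [pvOr3, h1, h2, h3] <;> split_ifs <;> simp_all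

-- the successor relation of one state under element x
def pvSucc (x : Int) (s t : Int × Int × Int) : Prop :=
  (s.1 - x ≥ 0 ∧ t = (s.1 - x, s.2.1, s.2.2)) ∨
  (s.2.1 - x ≥ 0 ∧ t = (s.1, s.2.1 - x, s.2.2)) ∨
  (s.2.2 - x ≥ 0 ∧ t = (s.1, s.2.1, s.2.2 - x))

lemma mem_step1 (x : Int) (s : Int × Int × Int) (acc : List (Int × Int × Int)) (t : Int × Int × Int) :
    t ∈ (let acc1 := if s.1 - x ≥ 0 then PySem.Set.add acc (s.1 - x, s.2.1, s.2.2) else acc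
         let acc2 := if s.2.1 - x ≥ 0 then PySem.Set.add acc1 (s.1, s.2.1 - x, s.2.2) else acc1
         if s.2.2 - x ≥ 0 then PySem.Set.add acc2 (s.1, s.2.1, s.2.2 - x) else acc2)
    ↔ t ∈ acc ∨ pvSucc x s t := by
  dsimp only []
  unfold pvSucc
  by_cases hA : x ≤ s.1 <;> by_cases hB : x ≤ s.2.1 <;> by_cases hC : x ≤ s.2.2 <;>
    simp [PySem.Set.mem_add, hA, hB, hC] <;> tauto

lemma mem_pvStep_aux (x : Int) (T : List (Int × Int × Int)) :
    ∀ (acc : List (Int × Int × Int)) (t : Int × Int × Int),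
      t ∈ T.foldl (fun acc s =>
        let acc1 := if s.1 - x ≥ 0 then PySem.Set.add acc (s.1 - x, s.2.1, s.2.2) else acc
        let acc2 := if s.2.1 - x ≥ 0 then PySem.Set.add acc1 (s.1, s.2.1 - x, s.2.2) else acc1
        if s.2.2 - x ≥ 0 then PySem.Set.add acc2 (s.1, s.2.1, s.2.2 - x) else acc2) acc
      ↔ t ∈ acc ∨ ∃ s ∈ T, pvSucc x s t := by
  induction T with
  | nil => simp
  | cons s T ih =>
    intro acc t
    rw [List.foldl_cons, ih, mem_step1]
    simp only [List.mem_cons]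
    constructor
    · rintro ((h | h) | ⟨u, hu, hs⟩)
      · exact Or.inl h
      · exact Or.inr ⟨s, Or.inl rfl, h⟩
      · exact Or.inr ⟨u, Or.inr hu, hs⟩
    · rintro (h | ⟨u, (rfl | hu), hs⟩)
      · exact Or.inl (Or.inl h)
      · exact Or.inl (Or.inr hs)
      · exact Or.inr ⟨u, hu, hs⟩

lemma mem_pvStep (x : Int) (T : List (Int × Int × Int)) (t : Int × Int × Int) :
    t ∈ pvStep x T ↔ ∃ s ∈ T, pvSucc x s t := by
  unfold pvStep
  rw [mem_pvStep_aux]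
  simp [PySem.Set.empty]

-- PA_one_iff restated through the successor relation
lemma PA_one_succ_iff (S : List Int) (i : Int) (s : Int × Int × Int) (x : Int)
    (hx : PySem.List.pyGet? S i = some x) (hi : ¬ i ≥ (S.length : Int))
    (hz : s ≠ (0, 0, 0)) :
    Partitioning_recursion S i s.1 s.2.1 s.2.2 = 1 ↔
      ∃ t, pvSucc x s t ∧ Partitioning_recursion S (i+1) t.1 t.2.1 t.2.2 = 1 := by
  obtain ⟨a, b, c⟩ := s
  have hz' : ¬ (a = 0 ∧ b = 0 ∧ c = 0) := by simpa [Prod.ext_iff] using hz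
  rw [PA_one_iff S i a b c x hx hi hz']
  constructor
  · rintro (⟨h, h1⟩ | ⟨h, h1⟩ | ⟨h, h1⟩)
    · exact ⟨(a - x, b, c), Or.inl ⟨h, rfl⟩, h1⟩
    · exact ⟨(a, b - x, c), Or.inr (Or.inl ⟨h, rfl⟩), h1⟩
    · exact ⟨(a, b, c - x), Or.inr (Or.inr ⟨h, rfl⟩), h1⟩
  · rintro ⟨t, (⟨h, rfl⟩ | ⟨h, rfl⟩ | ⟨h, rfl⟩), h1⟩
    · exact Or.inl ⟨h, h1⟩
    · exact Or.inr (Or.inl ⟨h, h1⟩)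
    · exact Or.inr (Or.inr ⟨h, h1⟩)

-- main invariant: the BFS from layer T at level i returns 1 exactly when some
-- state of T succeeds in A's recursion from level i
lemma pvRun_eq (S : List Int) : ∀ (k : ℕ) (i : Int) (T : List (Int × Int × Int)),
    ((S.length : Int) - i).toNat = k →
    pvRun S i T =
      if ∃ s ∈ T, Partitioning_recursion S i s.1 s.2.1 s.2.2 = 1 then 1 else 0 := by
  intro k
  induction k with
  | zero =>
    intro i T hk
    have hi : i ≥ (S.length : Int) := by omega
    rw [pvRun]
    by_cases hm : ((0 : Int), (0 : Int), (0 : Int)) ∈ T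
    · rw [if_pos hm, if_pos ⟨(0,0,0), hm, by rw [Partitioning_recursion]; simp⟩]
    · rw [if_neg hm, if_pos hi, if_neg]
      rintro ⟨s, hs, h1⟩
      rw [Partitioning_recursion] at h1
      split_ifs at h1 with h0
      · obtain ⟨a, b, c⟩ := s
        obtain ⟨rfl, rfl, rfl⟩ := h0
        exact hm hs
      · simp at h1
  | succ k ih =>
    intro i T hk
    rw [pvRun]
    by_cases hm : ((0 : Int), (0 : Int), (0 : Int)) ∈ T
    · rw [if_pos hm, if_pos ⟨(0,0,0), hm, by rw [Partitioning_recursion]; simp⟩]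
    · rw [if_neg hm]
      have hi : ¬ i ≥ (S.length : Int) := by omega
      rw [if_neg hi]
      cases hx : PySem.List.pyGet? S i with
      | none =>
        rw [if_neg]
        rintro ⟨s, hs, h1⟩
        rw [Partitioning_recursion] at h1
        split_ifs at h1 with h0
        · obtain ⟨a, b, c⟩ := s
          obtain ⟨rfl, rfl, rfl⟩ := h0
          exact hm hs
        · rw [hx] at h1; simp at h1
      | some x =>
        show pvRun S (i+1) (pvStep x T) = _
        rw [ih (i+1) (pvStep x T) (by omega)]
        congr 1
        simp only [eq_iff_iff]
        constructor
        · rintro ⟨t, ht, h1⟩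
          rw [mem_pvStep] at ht
          obtain ⟨s, hs, hsucc⟩ := ht
          have hz : s ≠ (0, 0, 0) := fun h => hm (h ▸ hs)
          exact ⟨s, hs, (PA_one_succ_iff S i s x hx hi hz).2 ⟨t, hsucc, h1⟩⟩
        · rintro ⟨s, hs, h1⟩
          have hz : s ≠ (0, 0, 0) := fun h => hm (h ▸ hs)
          obtain ⟨t, hsucc, ht⟩ := (PA_one_succ_iff S i s x hx hi hz).1 h1
          exact ⟨t, (mem_pvStep x T t).2 ⟨s, hs, hsucc⟩, ht⟩

-- ===== VERDICT (by name: the statement is the Claim_ definition above) =====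
theorem Partitioning_recursion_spec : Claim_equal_Partitioning_recursion := by
  intro S n s1 s2 s3 _ _
  unfold Spec_Partitioning_recursion Partitioning_recursion_alt
  rw [pvRun_eq S (((S.length : Int) - n).toNat) n _ rfl]
  rcases PA_zero_or_one S n s1 s2 s3 with h | h <;> simp [h]
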